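-- pv_equiv track=rewrite | github.com/Neptuneson/School | CS412/exact_solution.py | max_3sat_brute_force
-- ===== SOURCE A (Python) =====
-- from itertools import product
--
-- def evaluate_clause(clause, assignment):
--     for literal in clause:
--         variable, is_negated = abs(literal), (literal < 0)
--         if (assignment[variable] == 1 and not is_negated) or (assignment[variable] == 0 and is_negated):
--             return 1
--     return 0
--
-- def max_3sat_brute_force(clauses, num_vars):
--     best_assignment = None
--     best_score = 0
--
--     for assignment in product([0, 1], repeat=num_vars + 1):
--         score = sum(evaluate_clause(clause, assignment) for clause in clauses)
--         if score > best_score: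
--             best_score = score
--             best_assignment = assignment
--
--     return best_assignment, best_score
-- ===== SOURCE B (Python) =====
-- def max_3sat_brute_force(clauses, num_vars):
--     def sat(clause, a):
--         return any((a[abs(l)] == 1 and not l < 0) or (a[abs(l)] == 0 and l < 0)
--                    for l in clause)
--
--     def score(a):
--         return sum(1 for c in clauses if sat(c, a))
--
--     def dfs(k, partial, best):
--         if k == 0:
--             s = score(partial)
--             return (tuple(partial), s) if s > best[1] else best
--         best = dfs(k - 1, partial + [0], best)
--         return dfs(k - 1, partial + [1], best)
--
--     return dfs(num_vars + 1, [], (None, 0))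
-- ===== Notes on version B (the rewrite author's own statement) =====
-- stated objective: alternative
-- what changed: Replaced the flat itertools.product enumeration with a recursive DFS that assigns one variable at a time (0 before 1), threading the running best through the recursion; the clause check becomes any() and the score a conditional count.
import Mathlib
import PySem

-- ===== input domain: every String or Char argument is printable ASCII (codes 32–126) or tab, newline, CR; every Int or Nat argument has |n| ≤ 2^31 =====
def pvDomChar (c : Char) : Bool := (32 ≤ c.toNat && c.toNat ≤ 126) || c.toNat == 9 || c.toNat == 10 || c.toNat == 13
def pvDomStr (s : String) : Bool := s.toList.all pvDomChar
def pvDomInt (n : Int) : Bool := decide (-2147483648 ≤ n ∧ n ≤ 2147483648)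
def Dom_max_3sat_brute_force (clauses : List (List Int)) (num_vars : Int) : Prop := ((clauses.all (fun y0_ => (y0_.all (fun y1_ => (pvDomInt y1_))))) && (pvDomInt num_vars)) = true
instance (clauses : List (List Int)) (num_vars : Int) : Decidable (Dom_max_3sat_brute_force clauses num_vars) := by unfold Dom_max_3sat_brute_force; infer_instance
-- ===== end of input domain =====

-- B replaces the flat itertools.product loop by a recursive DFS that assigns one
-- variable at a time (0 before 1), threading the running best (alternative decomposition).

-- ===== PORT A =====
-- evaluate_clause: loop over literals with early return 1 on first satisfied literal.
-- assignment[variable] with variable = abs(literal) ≥ 0, in range under Pre_ → List.getD is exact there.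
def evalClause (clause : List Int) (assignment : List Int) : Int :=
  match clause with
  | [] => 0
  | l :: rest =>
    if (assignment.getD l.natAbs 0 == 1 && !decide (l < 0))
       || (assignment.getD l.natAbs 0 == 0 && decide (l < 0)) then 1
    else evalClause rest assignment

-- product([0,1], repeat=k): all 0/1 tuples of length k in lexicographic order (leftmost slowest)
def prodList : Nat → List (List Int)
  | 0 => [[]]
  | k + 1 => ([0, 1] : List Int).flatMap (fun b => (prodList k).map (b :: ·))

def max_3sat_brute_force (clauses : List (List Int)) (num_vars : Int) : Option (List Int) × Int :=
  (prodList (num_vars + 1).toNat).foldl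
    (fun best assignment =>
      let score := clauses.foldl (fun s c => s + evalClause c assignment) 0
      if score > best.2 then (some assignment, score) else best)
    (none, 0)

-- ===== PORT B =====
def satClause (clause : List Int) (a : List Int) : Bool :=
  clause.any (fun l =>
    (a.getD l.natAbs 0 == 1 && !decide (l < 0)) || (a.getD l.natAbs 0 == 0 && decide (l < 0)))

def scoreB (clauses : List (List Int)) (a : List Int) : Int :=
  clauses.foldl (fun s c => if satClause c a then s + 1 else s) 0

def dfsB (clauses : List (List Int)) : Nat → List Int → Option (List Int) × Int → Option (List Int) × Int
  | 0, part, best =>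
      let s := scoreB clauses part
      if s > best.2 then (some part, s) else best
  | k + 1, part, best => dfsB clauses k (part ++ [1]) (dfsB clauses k (part ++ [0]) best)

def max_3sat_brute_force_alt (clauses : List (List Int)) (num_vars : Int) : Option (List Int) × Int :=
  dfsB clauses (num_vars + 1).toNat [] (none, 0)

-- ===== PRECONDITION & SPEC =====
-- exactly where the Python A returns: repeat = num_vars+1 must be ≥ 0 (else ValueError)
-- and every literal's variable abs(l) must index the length-(num_vars+1) tuple (else IndexError)
def Pre_max_3sat_brute_force (clauses : List (List Int)) (num_vars : Int) : Prop :=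
  -1 ≤ num_vars ∧ ∀ c ∈ clauses, ∀ l ∈ c, |l| ≤ num_vars

instance (clauses : List (List Int)) (num_vars : Int) : Decidable (Pre_max_3sat_brute_force clauses num_vars) := by
  unfold Pre_max_3sat_brute_force; infer_instance

def pvWitness_max_3sat_brute_force : List (List Int) × Int := ([[1, -2], [2]], 2)

def Spec_max_3sat_brute_force (clauses : List (List Int)) (num_vars : Int) (out : Option (List Int) × Int) : Prop := out = max_3sat_brute_force_alt clauses num_vars
instance (clauses : List (List Int)) (num_vars : Int) (out : Option (List Int) × Int) : Decidable (Spec_max_3sat_brute_force clauses num_vars out) := by unfold Spec_max_3sat_brute_force; infer_instance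

-- ===== CLAIM (what is proved, stated in full; the proofs are below) =====
def Claim_equal_max_3sat_brute_force : Prop := ∀ (clauses : List (List Int)) (num_vars : Int), Dom_max_3sat_brute_force clauses num_vars → Pre_max_3sat_brute_force clauses num_vars → Spec_max_3sat_brute_force clauses num_vars (max_3sat_brute_force clauses num_vars)

-- ===== LEMMAS AND PROOFS =====

-- A's early-return clause loop computes the indicator of B's any()
theorem evalClause_eq_sat (clause a : List Int) :
    evalClause clause a = if satClause clause a then 1 else 0 := by
  induction clause with
  | nil => simp [evalClause, satClause]
  | cons l rest ih =>
    simp only [evalClause]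
    have hs : satClause (l :: rest) a
        = (((a.getD l.natAbs 0 == 1 && !decide (l < 0))
            || (a.getD l.natAbs 0 == 0 && decide (l < 0))) || satClause rest a) := by
      simp [satClause]
    rw [hs, ih]
    cases ((a.getD l.natAbs 0 == 1 && !decide (l < 0))
        || (a.getD l.natAbs 0 == 0 && decide (l < 0))) <;> simp

-- A's sum of clause indicators equals B's conditional count
theorem score_eq (a : List Int) (clauses : List (List Int)) :
    ∀ init : Int,
    clauses.foldl (fun s c => s + evalClause c a) init
      = clauses.foldl (fun s c => if satClause c a then s + 1 else s) init := by
  induction clauses with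
  | nil => intro init; rfl
  | cons c rest ih =>
    intro init
    rw [List.foldl_cons, List.foldl_cons, ih, evalClause_eq_sat c a]
    have h : init + (if satClause c a then (1 : Int) else 0)
        = if satClause c a then init + 1 else init := by
      by_cases h : satClause c a <;> simp [h]
    rw [h]

-- DFS over the remaining k variables = fold of A's update over the lexicographic tuple list
theorem dfsB_eq_foldl (clauses : List (List Int)) :
    ∀ (k : Nat) (part : List Int) (best : Option (List Int) × Int),
    dfsB clauses k part best =
      (prodList k).foldl
        (fun best a =>
          let s := scoreB clauses (part ++ a)
          if s > best.2 then (some (part ++ a), s) else best) best := by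
  intro k
  induction k with
  | zero => intro part best; simp [dfsB, prodList]
  | succ k ih =>
    intro part best
    have expand : prodList (k + 1)
        = (prodList k).map (fun a => (0 : Int) :: a) ++ (prodList k).map (fun a => (1 : Int) :: a) := by
      simp [prodList, List.flatMap]
    rw [expand, List.foldl_append, List.foldl_map, List.foldl_map]
    simp only [dfsB, ih]
    have assoc : ∀ (c : Int) (a : List Int), part ++ [c] ++ a = part ++ c :: a := by
      intro c a; simp
    simp only [assoc]

theorem max3sat_eq (clauses : List (List Int)) (num_vars : Int) :
    max_3sat_brute_force clauses num_vars = max_3sat_brute_force_alt clauses num_vars := by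
  unfold max_3sat_brute_force max_3sat_brute_force_alt
  rw [dfsB_eq_foldl]
  congr 1
  funext best a
  simp only [List.nil_append, scoreB, score_eq]
  rfl

-- ===== VERDICT (by name: the statement is the Claim_ definition above) =====
theorem max_3sat_brute_force_spec : Claim_equal_max_3sat_brute_force := by
  intro clauses num_vars _ _
  unfold Spec_max_3sat_brute_force
  exact max3sat_eq clauses num_vars
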